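-- pv_equiv track=rewrite | github.com/miliar/Code_Jam_Webscraper | solutions_python/solutions_year17_round1_nr1/656.py | solve
-- ===== SOURCE A (Python) =====
-- def solve(block) :
-- 	rows = len(block) ; cols = len(block[0])
-- 	past_letters = set()
-- 	for r in range(rows) :
-- 		for c in range(1, cols) :
-- 			if block[r][c-1] != '?' and block[r][c] == '?' :
-- 				block[r][c] = block[r][c-1] # shift forwards
-- 		for c in reversed(range(1, cols)) :
-- 			if block[r][c-1] == '?' :
-- 				block[r][c-1] = block[r][c] # shift backwards
-- 	for r in range(1, rows) :
-- 		for c in range(cols) :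
-- 			if block[r][c] == '?' :
-- 				block[r][c] = block[r-1][c]
-- 	for r in reversed(range(1, rows)) :
-- 		for c in range(cols) :
-- 			if block[r-1][c] == '?' :
-- 				block[r-1][c] = block[r][c]
--
-- 	return '\n' + '\n'.join(''.join(row) for row in block)
-- ===== SOURCE B (Python) =====
-- # Nearest-source fill: one left-to-right scan per row (nearest letter to the left,
-- # backfilled with the row's first letter), then whole empty rows copy the nearest
-- # filled row above, falling back to the first filled row below.
-- # Like A, mutates block in place; the equivalence proved is about the return value.
-- def solve(block):
--     rows = len(block)
--     cols = len(block[0])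
--     filled = []
--     for r in range(rows):
--         cells = block[r][:cols]
--         if any(x != '?' for x in cells):
--             filled.append(r)
--             out = []
--             last = None
--             for x in cells:
--                 if x != '?':
--                     last = x
--                 out.append(last if last is not None else '?')
--             first = next(x for x in cells if x != '?')
--             block[r][:cols] = [first if y == '?' else y for y in out]
--     if filled:
--         fset = set(filled)
--         last = None
--         for r in range(rows):
--             if r in fset:
--                 last = r
--             else:
--                 src = last if last is not None else filled[0]
--                 block[r][:cols] = block[src][:cols]
--     return '\n' + '\n'.join(''.join(row) for row in block)
-- ===== Notes on version B (the rewrite author's own statement) =====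
-- stated objective: alternative
-- what changed: Replaces A's four in-place directional sweeps (left, right, down, up) by a nearest-source computation: one left-to-right scan per row fills each '?' with the nearest letter to its left (backfilled with the row's first letter), then a single pass copies each fully-empty row from the nearest filled row above, falling back to the first filled row below.
import Mathlib
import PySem

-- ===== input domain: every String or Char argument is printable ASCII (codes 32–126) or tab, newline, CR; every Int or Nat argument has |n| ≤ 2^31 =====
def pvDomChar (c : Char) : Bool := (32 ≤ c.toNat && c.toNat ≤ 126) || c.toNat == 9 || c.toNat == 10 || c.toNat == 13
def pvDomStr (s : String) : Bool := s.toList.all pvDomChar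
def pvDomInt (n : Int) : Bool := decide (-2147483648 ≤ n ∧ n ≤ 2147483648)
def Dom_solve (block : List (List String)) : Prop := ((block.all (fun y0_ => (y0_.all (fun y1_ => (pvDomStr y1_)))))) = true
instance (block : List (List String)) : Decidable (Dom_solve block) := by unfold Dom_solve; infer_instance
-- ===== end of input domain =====

-- B replaces A's four in-place directional sweeps by a nearest-source computation (per-row
-- nearest-left scan with first-letter backfill, then empty rows copy the nearest filled row
-- above, else the first filled row); both mutate `block` in Python — the equivalence proved
-- here is about the return value.

-- ===== PORT A =====
def pget (b : List (List String)) (r c : Nat) : String := (b.getD r []).getD c ""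
def pset (b : List (List String)) (r c : Nat) (v : String) : List (List String) :=
  b.set r ((b.getD r []).set c v)

def solve (block : List (List String)) : String :=
  let rows := block.length
  let cols := (block.getD 0 []).length
  let b1 := (List.range rows).foldl (fun b r =>
      let b := (List.range' 1 (cols-1)).foldl (fun b c =>
          if pget b r (c-1) ≠ "?" ∧ pget b r c = "?" then pset b r c (pget b r (c-1)) else b) b
      ((List.range' 1 (cols-1)).reverse).foldl (fun b c =>
          if pget b r (c-1) = "?" then pset b r (c-1) (pget b r c) else b) b) block
  let b2 := (List.range' 1 (rows-1)).foldl (fun b r =>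
      (List.range cols).foldl (fun b c =>
          if pget b r c = "?" then pset b r c (pget b (r-1) c) else b) b) b1
  let b3 := ((List.range' 1 (rows-1)).reverse).foldl (fun b r =>
      (List.range cols).foldl (fun b c =>
          if pget b (r-1) c = "?" then pset b (r-1) c (pget b r c) else b) b) b2
  "\n" ++ PySem.Str.join "\n" (b3.map (fun row => PySem.Str.join "" row))

-- ===== PORT B =====
def nearScan : Option String → List String → List String
  | _, [] => []
  | last, x :: xs =>
    if x ≠ "?" then x :: nearScan (some x) xs
    else last.getD "?" :: nearScan last xs

def fillRow (cells : List String) : List String :=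
  let out := nearScan none cells
  let first := (cells.find? (fun x => x ≠ "?")).getD "?"
  out.map (fun y => if y = "?" then first else y)

def procRow (cols : Nat) (row : List String) : List String :=
  let cells := row.take cols
  if cells.any (fun x => x ≠ "?") then fillRow cells ++ row.drop cols else row

def solve_alt (block : List (List String)) : String :=
  let rows := block.length
  let cols := (block.getD 0 []).length
  let proc := block.map (procRow cols)
  let filled := (List.range rows).filter (fun r => ((block.getD r []).take cols).any (fun x => x ≠ "?"))
  let final :=
    match filled with
    | [] => proc
    | f0 :: _ =>
      (((List.range rows).foldl (fun (st : Option Nat × List (List String)) r =>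
          if filled.contains r then (some r, (proc.getD r []) :: st.2)
          else
            ((st.1), ((proc.getD (st.1.getD f0) []).take cols ++ ((proc.getD r []).drop cols)) :: st.2))
        (none, [])).2).reverse
  "\n" ++ PySem.Str.join "\n" (final.map (fun row => PySem.Str.join "" row))

-- ===== PRECONDITION & SPEC =====
-- Pre_ excludes exactly the inputs where A raises: an empty block (block[0] is an
-- IndexError) and blocks with a row shorter than row 0 (an IndexError in a sweep).
def Pre_solve (block : List (List String)) : Prop :=
  block ≠ [] ∧ ∀ row ∈ block, (block.headD []).length ≤ row.length
instance (block : List (List String)) : Decidable (Pre_solve block) := by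
  unfold Pre_solve; infer_instance

def pvWitness_solve : List (List String) := [["a", "?"], ["?", "?"]]

def Spec_solve (block : List (List String)) (out : String) : Prop := out = solve_alt block
instance (block : List (List String)) (out : String) : Decidable (Spec_solve block out) := by
  unfold Spec_solve; infer_instance

-- ===== CLAIM (what is proved, stated in full; the proofs are below) =====
def Claim_equal_solve : Prop := ∀ (block : List (List String)), Dom_solve block → Pre_solve block → Spec_solve block (solve block)

-- ===== LEMMAS AND PROOFS =====

theorem getD_set_eq {α : Type} (b : List α) (r : Nat) (x d : α) (h : r < b.length) :
    (b.set r x).getD r d = x := by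
  simp [List.getD, List.getElem?_set_self, h]

theorem getD_set_ne {α : Type} (b : List α) (r j : Nat) (x : α) (d : α) (h : j ≠ r) :
    (b.set r x).getD j d = b.getD j d := by
  simp [List.getD, List.getElem?_set_ne (fun hh => h hh.symm)]

theorem set_getD_self {α : Type} (b : List α) (r : Nat) (d : α) : b.set r (b.getD r d) = b := by
  apply List.ext_getElem?
  intro j
  by_cases hj : j = r
  · subst hj
    by_cases h : j < b.length
    · simp [List.getD, List.getElem?_set_self, h, List.getElem?_eq_getElem h]
    · simp [List.getElem?_set_self, h]
  · simp [List.getElem?_set_ne (fun hh => hj hh.symm)]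

-- row-level shapes of port A's inner loops
def fwdStepR (s : List String) (c : Nat) : List String :=
  if s.getD (c-1) "" ≠ "?" ∧ s.getD c "" = "?" then s.set c (s.getD (c-1) "") else s
def bwdStepR (s : List String) (c : Nat) : List String :=
  if s.getD (c-1) "" = "?" then s.set (c-1) (s.getD c "") else s
def cpStepR (prev s : List String) (c : Nat) : List String :=
  if s.getD c "" = "?" then s.set c (prev.getD c "") else s
def rowA (cols : Nat) (row : List String) : List String :=
  ((List.range' 1 (cols-1)).reverse).foldl bwdStepR ((List.range' 1 (cols-1)).foldl fwdStepR row)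
def copyFill (cols : Nat) (prev cur : List String) : List String :=
  (List.range cols).foldl (cpStepR prev) cur

-- phase-2 / phase-3 row chains and the filled-row bookkeeping
def dRow (cols : Nat) (p : List (List String)) : Nat → List String
  | 0 => p.getD 0 []
  | j+1 => copyFill cols (dRow cols p j) (p.getD (j+1) [])

def uRowA (cols : Nat) (q : List (List String)) : Nat → List String
  | 0 => q.getD (q.length - 1) []
  | i+1 => copyFill cols (uRowA cols q i) (q.getD (q.length - 1 - (i+1)) [])

def lastF (f : Nat → Bool) : Nat → Option Nat
  | 0 => none
  | k+1 => if f k then some k else lastF f k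

def finRow (cols : Nat) (p : List (List String)) (f : Nat → Bool) (f0? : Option Nat)
    (j : Nat) : List String :=
  if f j then p.getD j []
  else match (lastF f j).or f0? with
    | some s => (p.getD s []).take cols ++ (p.getD j []).drop cols
    | none => p.getD j []

-- a fold with steps that only rewrite row r equals a set of the corresponding row fold
theorem foldl_G_nil (G : List String → Nat → List String) (hnil : ∀ c, G [] c = []) :
    ∀ cs : List Nat, cs.foldl G [] = [] := by
  intro cs
  induction cs with
  | nil => rfl
  | cons c cs ih => simp [List.foldl_cons, hnil c, ih]

theorem foldl_local (r : Nat) (G : List String → Nat → List String)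
    (F : List (List String) → Nat → List (List String))
    (hF : ∀ b c, F b c = b.set r (G (b.getD r []) c))
    (hnil : ∀ c, G [] c = []) :
    ∀ (cs : List Nat) (b : List (List String)),
      cs.foldl F b = b.set r (cs.foldl G (b.getD r [])) := by
  intro cs
  induction cs with
  | nil => intro b; exact (set_getD_self b r []).symm
  | cons c cs ih =>
    intro b
    by_cases hr : r < b.length
    · rw [List.foldl_cons, ih, hF, List.set_set, getD_set_eq _ _ _ _ hr, List.foldl_cons]
    · have hbr : b.getD r [] = [] := by
        simp [List.getD, List.getElem?_eq_none (by omega : b.length ≤ r)]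
      have hb : F b c = b := by
        rw [hF, hbr, hnil]; exact List.set_eq_of_length_le (by omega)
      rw [List.foldl_cons, hb, ih, hbr, foldl_G_nil G hnil, foldl_G_nil G hnil]

theorem foldl_local2 (r q : Nat) (hqr : q ≠ r) (G : List String → List String → Nat → List String)
    (F : List (List String) → Nat → List (List String))
    (hF : ∀ b c, F b c = b.set r (G (b.getD q []) (b.getD r []) c))
    (hnil : ∀ p c, G p [] c = []) :
    ∀ (cs : List Nat) (b : List (List String)),
      cs.foldl F b = b.set r (cs.foldl (G (b.getD q [])) (b.getD r [])) := by
  intro cs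
  induction cs with
  | nil => intro b; exact (set_getD_self b r []).symm
  | cons c cs ih =>
    intro b
    by_cases hr : r < b.length
    · rw [List.foldl_cons, ih, hF, List.set_set, getD_set_eq _ _ _ _ hr,
        getD_set_ne _ _ _ _ _ hqr, List.foldl_cons]
    · have hbr : b.getD r [] = [] := by
        simp [List.getD, List.getElem?_eq_none (by omega : b.length ≤ r)]
      have hb : F b c = b := by
        rw [hF, hbr, hnil]; exact List.set_eq_of_length_le (by omega)
      rw [List.foldl_cons, hb, ih, hbr, foldl_G_nil _ (hnil _), foldl_G_nil _ (hnil _)]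


-- getD-flavoured list extensionality helpers
theorem getD_getElem? {α : Type} (l : List α) (j : Nat) (d : α) (h : j < l.length) :
    l[j]? = some (l.getD j d) := by
  simp [List.getD, List.getElem?_eq_getElem h]

theorem ext_getD {α : Type} (l1 l2 : List α) (d : α) (hl : l1.length = l2.length)
    (h : ∀ j, j < l1.length → l1.getD j d = l2.getD j d) : l1 = l2 := by
  apply List.ext_getElem?
  intro j
  by_cases hj : j < l1.length
  · rw [getD_getElem? l1 j d hj, getD_getElem? l2 j d (by omega), h j hj]
  · rw [List.getElem?_eq_none (by omega), List.getElem?_eq_none (by omega)]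

theorem length_foldl_cpStep (prev : List String) :
    ∀ (cs : List Nat) (cur : List String), (cs.foldl (cpStepR prev) cur).length = cur.length := by
  intro cs
  induction cs with
  | nil => intro cur; rfl
  | cons c cs ih =>
    intro cur
    rw [List.foldl_cons, ih]
    unfold cpStepR
    split <;> simp

theorem copyFill_length (cols : Nat) (prev cur : List String) :
    (copyFill cols prev cur).length = cur.length := length_foldl_cpStep prev _ cur

theorem copyFill_getD (cols : Nat) (prev cur : List String) :
    ∀ j, j < cur.length →
      (copyFill cols prev cur).getD j "" =
        (if j < cols ∧ cur.getD j "" = "?" then prev.getD j "" else cur.getD j "") := by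
  induction cols with
  | zero =>
    intro j hj
    simp [copyFill]
  | succ cols ih =>
    intro j hj
    unfold copyFill at ih ⊢
    rw [List.range_succ, List.foldl_append, List.foldl_cons, List.foldl_nil]
    have hslen : (List.foldl (cpStepR prev) cur (List.range cols)).length = cur.length :=
      length_foldl_cpStep prev _ cur
    set s := List.foldl (cpStepR prev) cur (List.range cols) with hs
    unfold cpStepR
    by_cases hjc : j = cols
    · subst hjc
      have hsj : s.getD j "" = cur.getD j "" := by
        rw [ih j hj]; simp
      rw [hsj]
      by_cases hq : cur.getD j "" = "?"
      · rw [if_pos hq, getD_set_eq _ _ _ _ (by rw [hslen]; omega),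
          if_pos ⟨Nat.lt_succ_self j, hq⟩]
      · rw [if_neg hq, ih j hj, if_neg (fun hc => absurd hc.1 (Nat.lt_irrefl j)),
          if_neg (fun hc => hq hc.2)]
    · have step : (if s.getD cols "" = "?" then s.set cols (prev.getD cols "") else s).getD j "" = s.getD j "" := by
        split
        · exact getD_set_ne _ _ _ _ _ hjc
        · rfl
      rw [step, ih j hj]
      by_cases hp : cur.getD j "" = "?"
      · by_cases hlt : j < cols
        · rw [if_pos ⟨hlt, hp⟩, if_pos ⟨by omega, hp⟩]
        · rw [if_neg (fun hc => hlt hc.1), if_neg (fun hc => absurd hc.1 (by omega))]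
      · rw [if_neg (fun hc => hp hc.2), if_neg (fun hc => hp hc.2)]

theorem copyFill_full (cols : Nat) (prev cur : List String)
    (h : ∀ c, c < cols → cur.getD c "" ≠ "?") : copyFill cols prev cur = cur := by
  apply ext_getD _ _ "" (copyFill_length cols prev cur)
  intro j hj
  rw [copyFill_length] at hj
  rw [copyFill_getD cols prev cur j hj]
  split
  · rename_i hc
    exact absurd hc.2 (h j hc.1)
  · rfl

theorem copyFill_empty (cols : Nat) (prev cur : List String)
    (h1 : cols ≤ cur.length) (h2 : cols ≤ prev.length)
    (h : ∀ c, c < cols → cur.getD c "" = "?") :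
    copyFill cols prev cur = prev.take cols ++ cur.drop cols := by
  apply ext_getD _ _ "" (by simp [copyFill_length]; omega)
  intro j hj
  rw [copyFill_length] at hj
  rw [copyFill_getD cols prev cur j hj]
  by_cases hlt : j < cols
  · rw [if_pos ⟨hlt, h j hlt⟩]
    simp only [List.getD]
    rw [List.getElem?_append_left (by simp [List.length_take]; omega), List.getElem?_take,
      if_pos hlt]
  · rw [if_neg (fun hc => hlt hc.1)]
    simp only [List.getD]
    rw [List.getElem?_append_right (by simp [List.length_take]; omega)]
    have hlen : (prev.take cols).length = cols := by simp [List.length_take]; omega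
    rw [hlen, List.getElem?_drop]
    congr 2
    omega

theorem eq_of_all_q (l1 l2 : List String) (hl : l1.length = l2.length)
    (h1 : ∀ j, j < l1.length → l1.getD j "" = "?")
    (h2 : ∀ j, j < l2.length → l2.getD j "" = "?") : l1 = l2 := by
  apply ext_getD _ _ "" hl
  intro j hj
  rw [h1 j hj, h2 j (by omega)]


-- Phase-1 outer loop: a row-local step over all row indices is a map
theorem foldl_rows_getElem? (f : List String → List String)
    (F : List (List String) → Nat → List (List String))
    (hF : ∀ b r, r < b.length → F b r = b.set r (f (b.getD r []))) :
    ∀ (m k : Nat) (b : List (List String)), k + m = b.length →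
      ∀ j, ((List.range' k m).foldl F b)[j]? = if k ≤ j then b[j]?.map f else b[j]? := by
  intro m
  induction m with
  | zero =>
    intro k b hk j
    rw [List.range'_zero, List.foldl_nil]
    by_cases h : k ≤ j
    · rw [if_pos h, List.getElem?_eq_none (by omega : b.length ≤ j)]
      rfl
    · rw [if_neg h]
  | succ m ih =>
    intro k b hk j
    rw [List.range'_succ, List.foldl_cons, hF b k (by omega)]
    rw [ih (k+1) _ (by simp [List.length_set]; omega) j]
    by_cases h1 : k + 1 ≤ j
    · rw [if_pos h1, if_pos (by omega), List.getElem?_set_ne (by omega)]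
    · by_cases h2 : j = k
      · subst h2
        rw [if_neg h1, if_pos (le_refl j), List.getElem?_set_self (by omega),
          getD_getElem? b j [] (by omega)]
        rfl
      · rw [if_neg h1, if_neg (by omega), List.getElem?_set_ne (by omega)]

theorem foldl_rows_map (f : List String → List String)
    (F : List (List String) → Nat → List (List String))
    (hF : ∀ b r, r < b.length → F b r = b.set r (f (b.getD r []))) (b : List (List String)) :
    (List.range b.length).foldl F b = b.map f := by
  apply List.ext_getElem?
  intro j
  rw [List.range_eq_range', foldl_rows_getElem? f F hF b.length 0 b (by omega) j,
    if_pos (Nat.zero_le j), List.getElem?_map]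

-- Phase-2 loop: the downward chain of copyFills
theorem phase2_getD (cols : Nat)
    (F : List (List String) → Nat → List (List String))
    (hF : ∀ b r, 1 ≤ r → r < b.length →
      F b r = b.set r (copyFill cols (b.getD (r-1) []) (b.getD r []))) :
    ∀ (k : Nat) (b : List (List String)), k + 1 ≤ b.length →
      ((List.range' 1 k).foldl F b).length = b.length ∧
      ∀ j, j < b.length →
        ((List.range' 1 k).foldl F b).getD j [] =
          if j ≤ k then dRow cols b j else b.getD j [] := by
  intro k
  induction k with
  | zero =>
    intro b hk
    refine ⟨rfl, ?_⟩
    intro j hj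
    by_cases h : j ≤ 0
    · have hj0 : j = 0 := by omega
      subst hj0
      rw [if_pos h]
      rfl
    · rw [if_neg h]
      rfl
  | succ k ih =>
    intro b hk
    have hrange : List.range' 1 (k+1) = List.range' 1 k ++ [k+1] := by
      have harith : 1 + 1 * k = k + 1 := by omega
      rw [List.range'_concat, harith]
    obtain ⟨ihl, ihg⟩ := ih b (by omega)
    rw [hrange, List.foldl_append, List.foldl_cons, List.foldl_nil]
    rw [hF _ (k+1) (by omega) (by rw [ihl]; omega)]
    simp only [Nat.add_sub_cancel]
    have hk1 : (List.foldl F b (List.range' 1 k)).getD k [] = dRow cols b k := by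
      rw [ihg k (by omega), if_pos (le_refl k)]
    have hk2 : (List.foldl F b (List.range' 1 k)).getD (k+1) [] = b.getD (k+1) [] := by
      rw [ihg (k+1) (by omega), if_neg (by omega)]
    refine ⟨by simp [List.length_set, ihl], ?_⟩
    intro j hj
    by_cases hjk : j = k+1
    · subst hjk
      rw [getD_set_eq _ _ _ _ (by rw [ihl]; omega), hk1, hk2, if_pos (le_refl _)]
      rfl
    · rw [getD_set_ne _ _ _ _ _ hjk, ihg j hj]
      by_cases hjle : j ≤ k
      · rw [if_pos hjle, if_pos (by omega)]
      · rw [if_neg hjle, if_neg (by omega)]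

-- Phase-3 loop: the upward chain of copyFills
theorem phase3_getD (cols : Nat)
    (F : List (List String) → Nat → List (List String))
    (hF : ∀ b r, 1 ≤ r → r < b.length →
      F b r = b.set (r-1) (copyFill cols (b.getD r []) (b.getD (r-1) [])))
    (q : List (List String)) :
    ∀ (m : Nat) (b : List (List String)), b.length = q.length → m + 1 ≤ q.length →
      (∀ j, j < q.length →
        b.getD j [] = if m ≤ j then uRowA cols q (q.length-1-j) else q.getD j []) →
      (((List.range' 1 m).reverse).foldl F b).length = q.length ∧
      ∀ j, j < q.length →
        (((List.range' 1 m).reverse).foldl F b).getD j [] = uRowA cols q (q.length-1-j) := by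
  intro m
  induction m with
  | zero =>
    intro b hbl hm hinv
    simp only [List.range'_zero, List.reverse_nil, List.foldl_nil]
    refine ⟨hbl, ?_⟩
    intro j hj
    rw [hinv j hj, if_pos (Nat.zero_le j)]
  | succ m ih =>
    intro b hbl hm hinv
    have hrange : (List.range' 1 (m+1)).reverse = (m+1) :: (List.range' 1 m).reverse := by
      have harith : 1 + 1 * m = m + 1 := by omega
      rw [List.range'_concat, harith, List.reverse_append]
      rfl
    have hb' : F b (m+1) = b.set m (copyFill cols (b.getD (m+1) []) (b.getD m [])) := by
      rw [hF b (m+1) (by omega) (by omega)]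
      simp only [Nat.add_sub_cancel]
    rw [hrange, List.foldl_cons, hb']
    apply ih
    · simp [List.length_set, hbl]
    · omega
    · intro j hj
      by_cases hjm : j = m
      · subst hjm
        have e1 : b.getD (j+1) [] = uRowA cols q (q.length-1-(j+1)) := by
          rw [hinv (j+1) (by omega), if_pos (le_refl (j+1))]
        have e2 : b.getD j [] = q.getD j [] := by
          rw [hinv j (by omega), if_neg (by omega)]
        rw [getD_set_eq _ _ _ _ (by omega), e1, e2, if_pos (le_refl j)]
        have harith : q.length - 1 - j = (q.length - 1 - (j+1)) + 1 := by omega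
        rw [harith]
        have e3 : q.getD j [] = q.getD (q.length - 1 - ((q.length-1-(j+1)) + 1)) [] := by
          have : q.length - 1 - ((q.length-1-(j+1)) + 1) = j := by omega
          rw [this]
        rw [e3]
        rfl
      · rw [getD_set_ne _ _ _ _ _ hjm, hinv j hj]
        by_cases h1 : m+1 ≤ j
        · rw [if_pos h1, if_pos (by omega)]
        · rw [if_neg h1, if_neg (by omega)]



-- ===== row-level characterization: A's two sweeps = B's nearest-left scan + backfill =====
def nearVal (row : List String) (j : Nat) : String :=
  (((row.take (j+1)).reverse).find? (fun x => x ≠ "?")).getD "?"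

def fbV (cells : List String) : String := (cells.find? (fun x => x ≠ "?")).getD "?"

def midV (row : List String) (cols j : Nat) : String :=
  if nearVal row j = "?" then fbV (row.take cols) else nearVal row j

theorem nv_zero (row : List String) (h : 0 < row.length) : nearVal row 0 = row.getD 0 "" := by
  cases row with
  | nil => simp at h
  | cons x t =>
    show ((([x] : List String).reverse).find? (fun x => x ≠ "?")).getD "?" = x
    by_cases hx : x = "?"
    · subst hx; simp
    · simp [hx]

theorem nv_succ (row : List String) (j : Nat) (h : j+1 < row.length) :
    nearVal row (j+1) =
      if row.getD (j+1) "" ≠ "?" then row.getD (j+1) "" else nearVal row j := by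
  have ht : row.take (j+1+1) = row.take (j+1) ++ [row.getD (j+1) ""] := by
    rw [List.take_succ, getD_getElem? row (j+1) "" h]
    rfl
  unfold nearVal
  rw [ht, List.reverse_append]
  show ((row.getD (j+1) "" :: (row.take (j+1)).reverse).find? (fun x => x ≠ "?")).getD "?" = _
  by_cases hx : row.getD (j+1) "" = "?"
  · rw [List.find?_cons_of_neg (by simp; exact hx), if_neg (by simp; exact hx)]
  · rw [List.find?_cons_of_pos (by simp; exact hx), if_pos hx]
    rfl

theorem mem_take_getD (row : List String) (k : Nat) (x : String) (hx : x ∈ row.take k) :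
    ∃ i, i < k ∧ i < row.length ∧ row.getD i "" = x := by
  obtain ⟨i, hi, heq⟩ := List.getElem_of_mem hx
  have hlen : i < row.length := by simp [List.length_take] at hi; omega
  have hik : i < k := by simp [List.length_take] at hi; omega
  refine ⟨i, hik, hlen, ?_⟩
  have h1 : (row.take k)[i]? = some x := by
    rw [List.getElem?_eq_getElem hi, heq]
  rw [List.getElem?_take, if_pos hik] at h1
  rw [List.getD, h1]
  rfl

theorem nv_none (row : List String) (j : Nat) (h : nearVal row j = "?") :
    ∀ i, i ≤ j → i < row.length → row.getD i "" = "?" := by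
  intro i hij hi
  unfold nearVal at h
  cases hf : ((row.take (j+1)).reverse).find? (fun x => x ≠ "?") with
  | some v =>
    have hp := List.find?_some hf
    rw [hf] at h
    simp at h hp
    exact absurd h hp
  | none =>
    have hmem : row.getD i "" ∈ row.take (j+1) := by
      have h1 : (row.take (j+1))[i]? = some (row.getD i "") := by
        rw [List.getElem?_take, if_pos (by omega), getD_getElem? row i "" hi]
      exact List.mem_of_getElem? h1
    have := List.find?_eq_none.mp hf _ (List.mem_reverse.mpr hmem)
    simpa using this

theorem allq_take (row : List String) (k : Nat)
    (h : ∀ i, i < k → i < row.length → row.getD i "" = "?") :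
    ∀ x ∈ row.take k, x = "?" := by
  intro x hx
  obtain ⟨i, hik, hil, hval⟩ := mem_take_getD row k x hx
  rw [← hval]
  exact h i hik hil

theorem fbV_none (cells : List String) (ha : cells.any (fun x => x ≠ "?") = false) :
    fbV cells = "?" := by
  unfold fbV
  have h : cells.find? (fun x => x ≠ "?") = none := by
    rw [List.find?_eq_none]
    intro x hx
    have := List.any_eq_false.mp ha x hx
    simpa using this
  rw [h]
  rfl

theorem fbV_ne (cells : List String) (ha : cells.any (fun x => x ≠ "?") = true) :
    fbV cells ≠ "?" := by
  obtain ⟨x, hx, hpx⟩ := List.any_eq_true.mp ha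
  have hs : (cells.find? (fun x => x ≠ "?")).isSome := List.find?_isSome.mpr ⟨x, hx, hpx⟩
  obtain ⟨v, hv⟩ := Option.isSome_iff_exists.mp hs
  unfold fbV
  rw [hv]
  have := List.find?_some hv
  simpa using this

theorem nv_fb (row : List String) (cols j : Nat) (hj : j+1 < cols) (hc : cols ≤ row.length)
    (h0 : nearVal row j = "?") (h1 : row.getD (j+1) "" ≠ "?") :
    fbV (row.take cols) = row.getD (j+1) "" := by
  unfold fbV
  have hsplit : row.take cols =
      row.take (j+1) ++ (row.getD (j+1) "" :: List.drop (j+2) (row.take cols)) := by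
    have hlen : j+1 < (row.take cols).length := by simp [List.length_take]; omega
    have hd : List.drop (j+1) (row.take cols) =
        row.getD (j+1) "" :: List.drop (j+2) (row.take cols) := by
      rw [List.drop_eq_getElem_cons hlen]
      congr 1
      have h2 : (row.take cols)[j+1]? = some (row.getD (j+1) "") := by
        rw [List.getElem?_take, if_pos hj, getD_getElem? row (j+1) "" (by omega)]
      rw [List.getElem?_eq_getElem hlen] at h2
      exact Option.some.inj h2
    have htt : List.take (j+1) (row.take cols) = row.take (j+1) := by
      rw [List.take_take]
      congr 1
      omega
    conv_lhs => rw [← List.take_append_drop (j+1) (row.take cols), htt, hd]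
  rw [hsplit, List.find?_append]
  have hnone : (row.take (j+1)).find? (fun x => x ≠ "?") = none := by
    rw [List.find?_eq_none]
    intro x hx
    have := allq_take row (j+1) (fun i hik hil => nv_none row j h0 i (by omega) hil) x hx
    simp [this]
  rw [hnone, Option.none_or, List.find?_cons_of_pos (by simpa using h1)]
  rfl

-- forward sweep: every column gets its nearest letter to the left (or stays '?')
theorem fwd_getD (row : List String) (cols : Nat) (hc : cols ≤ row.length) :
    ∀ k, k ≤ cols - 1 →
      ((List.range' 1 k).foldl fwdStepR row).length = row.length ∧
      ∀ j, j < row.length →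
        ((List.range' 1 k).foldl fwdStepR row).getD j "" =
          if j ≤ k ∧ j < cols then nearVal row j else row.getD j "" := by
  intro k
  induction k with
  | zero =>
    intro _
    refine ⟨rfl, ?_⟩
    intro j hj
    by_cases h : j ≤ 0 ∧ j < cols
    · have hj0 : j = 0 := by omega
      subst hj0
      rw [if_pos h, nv_zero row (by omega)]
      rfl
    · rw [if_neg h]
      rfl
  | succ k ih =>
    intro hk
    obtain ⟨ihl, ihg⟩ := ih (by omega)
    have hrange : List.range' 1 (k+1) = List.range' 1 k ++ [k+1] := by
      have harith : 1 + 1 * k = k + 1 := by omega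
      rw [List.range'_concat, harith]
    rw [hrange, List.foldl_append, List.foldl_cons, List.foldl_nil]
    set s := (List.range' 1 k).foldl fwdStepR row with hs
    have hv1 : s.getD k "" = nearVal row k := by
      rw [ihg k (by omega), if_pos ⟨le_refl k, by omega⟩]
    have hv2 : s.getD (k+1) "" = row.getD (k+1) "" := by
      rw [ihg (k+1) (by omega), if_neg (fun hcon => by omega)]
    unfold fwdStepR
    simp only [Nat.add_sub_cancel]
    rw [hv1, hv2]
    by_cases hcond : nearVal row k ≠ "?" ∧ row.getD (k+1) "" = "?"
    · rw [if_pos hcond]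
      refine ⟨by simp [List.length_set, ihl], ?_⟩
      intro j hj
      by_cases hjk : j = k+1
      · subst hjk
        rw [getD_set_eq _ _ _ _ (by omega), if_pos ⟨le_refl _, by omega⟩,
          nv_succ row k (by omega), if_neg (by simpa using hcond.2)]
      · rw [getD_set_ne _ _ _ _ _ hjk, ihg j hj]
        by_cases hja : j ≤ k ∧ j < cols
        · rw [if_pos hja, if_pos ⟨by omega, hja.2⟩]
        · rw [if_neg hja, if_neg (fun hcon => hja ⟨by omega, hcon.2⟩)]
    · rw [if_neg hcond]
      refine ⟨ihl, ?_⟩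
      intro j hj
      rw [ihg j hj]
      by_cases hjk : j = k+1
      · subst hjk
        rw [if_neg (fun hcon => by omega), if_pos ⟨le_refl _, by omega⟩,
          nv_succ row k (by omega)]
        by_cases hq : row.getD (k+1) "" = "?"
        · rw [if_neg (by simpa using hq)]
          have : nearVal row k = "?" := by
            by_contra hne
            exact hcond ⟨hne, hq⟩
          rw [this, hq]
        · rw [if_pos (by simpa using hq)]
      · by_cases hja : j ≤ k ∧ j < cols
        · rw [if_pos hja, if_pos ⟨by omega, hja.2⟩]
        · rw [if_neg hja, if_neg (fun hcon => hja ⟨by omega, hcon.2⟩)]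

-- backward sweep: the leading '?' block is backfilled with the first letter
theorem bwd_getD (row : List String) (cols : Nat) (hc : cols ≤ row.length) :
    ∀ m, m ≤ cols - 1 → ∀ s, s.length = row.length →
      (∀ j, j < row.length →
        s.getD j "" = if j < cols then (if m ≤ j then midV row cols j else nearVal row j)
          else row.getD j "") →
      (((List.range' 1 m).reverse).foldl bwdStepR s).length = row.length ∧
      ∀ j, j < row.length →
        (((List.range' 1 m).reverse).foldl bwdStepR s).getD j "" =
          if j < cols then midV row cols j else row.getD j "" := by
  intro m
  induction m with
  | zero =>
    intro _ s hsl hinv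
    refine ⟨hsl, ?_⟩
    intro j hj
    show s.getD j "" = _
    rw [hinv j hj]
    by_cases h : j < cols
    · rw [if_pos h, if_pos h, if_pos (Nat.zero_le j)]
    · rw [if_neg h, if_neg h]
  | succ m ih =>
    intro hm s hsl hinv
    have hrange : (List.range' 1 (m+1)).reverse = (m+1) :: (List.range' 1 m).reverse := by
      have harith : 1 + 1 * m = m + 1 := by omega
      rw [List.range'_concat, harith, List.reverse_append]
      rfl
    rw [hrange, List.foldl_cons]
    have hvm : s.getD m "" = nearVal row m := by
      rw [hinv m (by omega), if_pos (by omega), if_neg (by omega)]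
    have hvm1 : s.getD (m+1) "" = midV row cols (m+1) := by
      rw [hinv (m+1) (by omega), if_pos (by omega), if_pos (le_refl _)]
    unfold bwdStepR
    simp only [Nat.add_sub_cancel]
    rw [hvm, hvm1]
    by_cases hq : nearVal row m = "?"
    · rw [if_pos hq]
      apply ih (by omega)
      · simp [List.length_set, hsl]
      · intro j hj
        by_cases hjm : j = m
        · subst hjm
          rw [getD_set_eq _ _ _ _ (by omega), if_pos (by omega), if_pos (le_refl j)]
          unfold midV
          rw [if_pos hq]
          by_cases hq1 : nearVal row (j+1) = "?"
          · rw [if_pos hq1]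
          · rw [if_neg hq1]
            have hx : row.getD (j+1) "" ≠ "?" := by
              intro hx
              rw [nv_succ row j (by omega), if_neg (by simpa using hx)] at hq1
              exact hq1 hq
            rw [nv_succ row j (by omega), if_pos (by simpa using hx),
              nv_fb row cols j (by omega) hc hq hx]
        · rw [getD_set_ne _ _ _ _ _ hjm, hinv j hj]
          by_cases hjc : j < cols
          · by_cases hle : m+1 ≤ j
            · rw [if_pos hjc, if_pos hjc, if_pos hle, if_pos (by omega)]
            · have hjm2 : j < m := by omega
              rw [if_pos hjc, if_pos hjc, if_neg hle, if_neg (by omega)]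
          · rw [if_neg hjc, if_neg hjc]
    · rw [if_neg hq]
      apply ih (by omega) s hsl
      intro j hj
      rw [hinv j hj]
      by_cases hjc : j < cols
      · by_cases hle : m+1 ≤ j
        · rw [if_pos hjc, if_pos hjc, if_pos hle, if_pos (by omega)]
        · by_cases hjm : j = m
          · subst hjm
            rw [if_pos hjc, if_pos hjc, if_neg hle, if_pos (le_refl j)]
            unfold midV
            rw [if_neg hq]
          · rw [if_pos hjc, if_pos hjc, if_neg hle, if_neg (by omega)]
      · rw [if_neg hjc, if_neg hjc]


-- ===== B's per-row scan computes the same per-cell values =====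
theorem nearScan_cons (last : Option String) (x : String) (xs : List String) :
    nearScan last (x :: xs) =
      (if x ≠ "?" then x :: nearScan (some x) xs else last.getD "?" :: nearScan last xs) := rfl

theorem length_nearScan : ∀ (last : Option String) (cells : List String),
    (nearScan last cells).length = cells.length := by
  intro last cells
  induction cells generalizing last with
  | nil => rfl
  | cons x xs ih =>
    rw [nearScan_cons]
    split
    · simp [ih]
    · simp [ih]

theorem nearScan_getD : ∀ (cells : List String) (last : Option String) (j : Nat),
    j < cells.length →
    (nearScan last cells).getD j "" =
      (((cells.take (j+1)).reverse).find? (fun x => x ≠ "?")).getD (last.getD "?") := by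
  intro cells
  induction cells with
  | nil => intro last j hj; simp at hj
  | cons x xs ih =>
    intro last j hj
    rw [nearScan_cons]
    by_cases hx : x = "?"
    · subst hx
      rw [if_neg (by simp)]
      cases j with
      | zero => simp
      | succ j =>
        rw [show ((last.getD "?" :: nearScan last xs).getD (j+1) "" : String)
            = (nearScan last xs).getD j "" from rfl]
        rw [ih last j (by simpa using hj)]
        have hsplit : ((("?" : String) :: xs).take (j+1+1)).reverse
            = (xs.take (j+1)).reverse ++ ["?"] := by
          simp
        rw [hsplit, List.find?_append]
        simp
    · rw [if_pos (by simpa using hx)]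
      cases j with
      | zero => simp [hx]
      | succ j =>
        rw [show ((x :: nearScan (some x) xs).getD (j+1) "" : String)
            = (nearScan (some x) xs).getD j "" from rfl]
        rw [ih (some x) j (by simpa using hj)]
        have hsplit : ((x :: xs).take (j+1+1)).reverse = (xs.take (j+1)).reverse ++ [x] := by
          simp
        rw [hsplit, List.find?_append]
        cases hfind : (xs.take (j+1)).reverse.find? (fun y => y ≠ "?") with
        | some v => simp [hfind]
        | none => simp [hfind, hx]

theorem length_fillRow (cells : List String) : (fillRow cells).length = cells.length := by
  simp [fillRow, length_nearScan]

theorem fillRow_getD (cells : List String) (j : Nat) (hj : j < cells.length) :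
    (fillRow cells).getD j "" =
      (if (((cells.take (j+1)).reverse).find? (fun x => x ≠ "?")).getD "?" = "?" then fbV cells
       else (((cells.take (j+1)).reverse).find? (fun x => x ≠ "?")).getD "?") := by
  unfold fillRow
  have hlen : j < (nearScan none cells).length := by rw [length_nearScan]; exact hj
  rw [List.getD, List.getElem?_map, getD_getElem? _ j "" hlen]
  rw [show ((some ((nearScan none cells).getD j "")).map
      (fun y => if y = "?" then (cells.find? (fun x => x ≠ "?")).getD "?" else y)).getD ""
      = (if (nearScan none cells).getD j "" = "?" then (cells.find? (fun x => x ≠ "?")).getD "?"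
         else (nearScan none cells).getD j "") from rfl]
  rw [nearScan_getD cells none j hj]
  rfl

theorem length_procRow (cols : Nat) (row : List String) (hc : cols ≤ row.length) :
    (procRow cols row).length = row.length := by
  simp only [procRow]
  split
  · simp [length_fillRow, List.length_take, List.length_drop]
    omega
  · rfl

theorem rowA_eq_procRow (cols : Nat) (row : List String) (hc : cols ≤ row.length) :
    rowA cols row = procRow cols row := by
  unfold rowA
  obtain ⟨hfl, hfg⟩ := fwd_getD row cols hc (cols-1) (le_refl _)
  have hmid_top : midV row cols (cols-1) = nearVal row (cols-1) := by
    unfold midV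
    by_cases hq : nearVal row (cols-1) = "?"
    · rw [if_pos hq, hq, fbV_none _ (List.any_eq_false.mpr (by
        intro x hx
        have := allq_take row cols (fun i hik hil => nv_none row (cols-1) hq i (by omega) hil) x hx
        simp [this]))]
    · rw [if_neg hq]
  have hentry : ∀ j, j < row.length →
      ((List.range' 1 (cols-1)).foldl fwdStepR row).getD j "" =
        if j < cols then (if cols-1 ≤ j then midV row cols j else nearVal row j)
        else row.getD j "" := by
    intro j hj
    rw [hfg j hj]
    by_cases hjc : j < cols
    · rw [if_pos ⟨by omega, hjc⟩, if_pos hjc]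
      by_cases htop : cols-1 ≤ j
      · have hje : j = cols-1 := by omega
        subst hje
        rw [if_pos htop, hmid_top]
      · rw [if_neg htop]
    · rw [if_neg (fun hcon => hjc hcon.2), if_neg hjc]
  obtain ⟨hbl, hbg⟩ := bwd_getD row cols hc (cols-1) (le_refl _) _ hfl hentry
  apply ext_getD _ _ "" (by rw [hbl, length_procRow cols row hc])
  intro j hj
  rw [hbl] at hj
  rw [hbg j hj]
  simp only [procRow]
  by_cases ha : (row.take cols).any (fun x => x ≠ "?") = true
  · rw [if_pos ha]
    by_cases hjc : j < cols
    · rw [if_pos hjc]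
      have hfr : ((fillRow (row.take cols) ++ row.drop cols).getD j "" : String)
          = (fillRow (row.take cols)).getD j "" := by
        simp only [List.getD]
        rw [List.getElem?_append_left (by
          rw [length_fillRow]; simp [List.length_take]; omega)]
      rw [hfr, fillRow_getD _ j (by simp [List.length_take]; omega)]
      have hcells : ((row.take cols).take (j+1)) = row.take (j+1) := by
        rw [List.take_take]
        congr 1
        omega
      unfold midV nearVal fbV
      rw [hcells]
    · rw [if_neg hjc]
      simp only [List.getD]
      rw [List.getElem?_append_right (by
        rw [length_fillRow]; simp [List.length_take]; omega)]
      rw [length_fillRow, List.getElem?_drop]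
      have harith : (row.take cols).length = cols := by simp [List.length_take]; omega
      rw [harith]
      have harith2 : cols + (j - cols) = j := by omega
      rw [harith2]
  · rw [if_neg ha]
    have ha' : (row.take cols).any (fun x => x ≠ "?") = false := by
      cases h : (row.take cols).any (fun x => x ≠ "?")
      · rfl
      · exact absurd h ha
    have hallq : ∀ i, i < cols → i < row.length → row.getD i "" = "?" := by
      intro i hik hil
      have hmem : row.getD i "" ∈ row.take cols := by
        have h1 : (row.take cols)[i]? = some (row.getD i "") := by
          rw [List.getElem?_take, if_pos hik, getD_getElem? row i "" hil]
        exact List.mem_of_getElem? h1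
      have := List.any_eq_false.mp ha' _ hmem
      simpa using this
    by_cases hjc : j < cols
    · rw [if_pos hjc]
      have hq : nearVal row j = "?" := by
        unfold nearVal
        rw [List.find?_eq_none.mpr (by
          intro x hx
          have hx' := List.mem_reverse.mp hx
          have := allq_take row (j+1) (fun i hik hil => hallq i (by omega) hil) x hx'
          simp [this])]
        rfl
      unfold midV
      rw [if_pos hq, fbV_none _ ha', hallq j hjc hj]
    · rw [if_neg hjc]


-- ===== vertical structure: filled rows, nearest sources =====
theorem take_getD {α : Type} (l : List α) (k c : Nat) (d : α) (hc : c < k) :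
    (l.take k).getD c d = l.getD c d := by
  simp only [List.getD]
  rw [List.getElem?_take, if_pos hc]

theorem take_append_exact {α : Type} (l1 l2 : List α) (k : Nat) (h : l1.length = k) :
    (l1 ++ l2).take k = l1 := by
  subst h
  exact List.take_left

theorem lastF_some (f : Nat → Bool) : ∀ j s, lastF f j = some s → f s = true ∧ s < j := by
  intro j
  induction j with
  | zero => intro s h; simp [lastF] at h
  | succ j ih =>
    intro s h
    unfold lastF at h
    by_cases hf : f j
    · rw [if_pos hf] at h
      injection h with h
      subst h
      exact ⟨hf, by omega⟩
    · rw [if_neg hf] at h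
      obtain ⟨h1, h2⟩ := ih s h
      exact ⟨h1, by omega⟩

theorem lastF_none (f : Nat → Bool) : ∀ j, lastF f j = none → ∀ i, i < j → f i = false := by
  intro j
  induction j with
  | zero => intro _ i hi; omega
  | succ j ih =>
    intro h i hi
    unfold lastF at h
    by_cases hf : f j
    · rw [if_pos hf] at h
      exact absurd h (by simp)
    · rw [if_neg hf] at h
      by_cases hij : i = j
      · subst hij
        cases hfi : f i
        · rfl
        · exact absurd hfi hf
      · exact ih h i (by omega)

theorem lastF_none_of (f : Nat → Bool) : ∀ j, (∀ i, i < j → f i = false) → lastF f j = none := by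
  intro j
  induction j with
  | zero => intro _; rfl
  | succ j ih =>
    intro h
    show (if f j = true then some j else lastF f j) = none
    rw [if_neg (by rw [h j (by omega)]; simp)]
    exact ih (fun i hi => h i (by omega))

theorem lastF_pos (f : Nat → Bool) (j : Nat) (h : f j = true) : lastF f (j+1) = some j := by
  show (if f j = true then some j else lastF f j) = some j
  rw [if_pos h]

theorem lastF_neg (f : Nat → Bool) (j : Nat) (h : f j = false) : lastF f (j+1) = lastF f j := by
  show (if f j = true then some j else lastF f j) = lastF f j
  rw [if_neg (by rw [h]; simp)]

theorem filter_range_nil (n : Nat) (f : Nat → Bool) :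
    (List.range n).filter f = [] ↔ ∀ i, i < n → f i = false := by
  rw [List.filter_eq_nil_iff]
  constructor
  · intro h i hi
    have := h i (List.mem_range.mpr hi)
    simpa using this
  · intro h x hx
    rw [h x (List.mem_range.mp hx)]
    simp

theorem filter_range_head (n m : Nat) (f : Nat → Bool) (hm : m < n) (hf : f m = true)
    (hmin : ∀ i, i < m → f i = false) : ((List.range n).filter f).head? = some m := by
  have hsplit : List.range n = List.range m ++ List.range' m (n - m) := by
    rw [List.range_eq_range', List.range_eq_range']
    have h1 : List.range' 0 m 1 ++ List.range' (0 + 1 * m) (n - m) 1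
        = List.range' 0 (m + (n - m)) 1 := List.range'_append
    have h2 : 0 + 1 * m = m := by omega
    have h3 : m + (n - m) = n := by omega
    rw [h2, h3] at h1
    exact h1.symm
  rw [hsplit, List.filter_append, (filter_range_nil m f).mpr hmin, List.nil_append]
  have h2 : List.range' m (n-m) = m :: List.range' (m+1) (n-m-1) := by
    cases hnm : n - m with
    | zero => omega
    | succ k =>
      simp only [Nat.add_sub_cancel]
      exact List.range'_succ
  rw [h2, List.filter_cons, if_pos (by rw [hf])]
  rfl

theorem head_filter_range (n : Nat) (f : Nat → Bool) (m : Nat)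
    (h : ((List.range n).filter f).head? = some m) : m < n ∧ f m = true := by
  cases hl : (List.range n).filter f with
  | nil => rw [hl] at h; simp at h
  | cons a t =>
    rw [hl] at h
    have ham : a = m := by injection h
    have hm : m ∈ (List.range n).filter f := by
      rw [hl, ← ham]
      exact List.mem_cons_self
    have hm2 := List.mem_filter.mp hm
    exact ⟨List.mem_range.mp hm2.1, hm2.2⟩

theorem dRow_struct (cols : Nat) (p : List (List String)) (f : Nat → Bool) (n : Nat)
    (hlen : ∀ r, r < n → cols ≤ (p.getD r []).length)
    (hfull : ∀ r, r < n → f r = true → ∀ c, c < cols → (p.getD r []).getD c "" ≠ "?")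
    (hempty : ∀ r, r < n → f r = false → ∀ c, c < cols → (p.getD r []).getD c "" = "?") :
    ∀ j, j < n → dRow cols p j =
      (if f j then p.getD j []
       else match lastF f j with
        | some s => (p.getD s []).take cols ++ (p.getD j []).drop cols
        | none => p.getD j []) := by
  intro j
  induction j with
  | zero =>
    intro hj
    rw [show dRow cols p 0 = p.getD 0 [] from rfl]
    by_cases hf : f 0
    · rw [if_pos hf]
    · rw [if_neg hf]
      rfl
  | succ j ih =>
    intro hj
    rw [show dRow cols p (j+1) = copyFill cols (dRow cols p j) (p.getD (j+1) []) from rfl]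
    rw [ih (by omega)]
    by_cases hf1 : f (j+1)
    · rw [if_pos hf1]
      exact copyFill_full cols _ _ (fun c hc => hfull (j+1) hj hf1 c hc)
    · have hf1' : f (j+1) = false := by
        cases hv : f (j+1)
        · rfl
        · exact absurd hv hf1
      rw [if_neg hf1]
      have hcur : ∀ c, c < cols → (p.getD (j+1) []).getD c "" = "?" :=
        hempty (j+1) hj hf1'
      by_cases hfj : f j
      · rw [if_pos hfj, lastF_pos f j hfj]
        rw [copyFill_empty cols _ _ (hlen (j+1) hj) (hlen j (by omega)) hcur]
      · have hfj' : f j = false := by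
          cases hv : f j
          · rfl
          · exact absurd hv hfj
        rw [if_neg hfj, lastF_neg f j hfj']
        cases hlf : lastF f j with
        | some st =>
          have hst := lastF_some f j st hlf
          have hprevlen : cols ≤ ((p.getD st []).take cols ++ (p.getD j []).drop cols).length := by
            simp only [List.length_append, List.length_take, List.length_drop]
            have := hlen st (by omega)
            omega
          rw [copyFill_empty cols _ _ (hlen (j+1) hj) hprevlen hcur]
          rw [take_append_exact _ _ cols (by
            simp only [List.length_take]
            have := hlen st (by omega)
            omega)]
        | none =>
          rw [copyFill_empty cols _ _ (hlen (j+1) hj) (hlen j (by omega)) hcur]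
          conv_rhs => rw [← List.take_append_drop cols (p.getD (j+1) [])]
          congr 1
          apply eq_of_all_q
          · simp only [List.length_append, List.length_take]
            have h1 := hlen j (by omega)
            have h2 := hlen (j+1) hj
            omega
          · intro c hc
            have hcc : c < cols := by
              simp only [List.length_append, List.length_take] at hc
              omega
            rw [take_getD _ _ _ _ hcc]
            exact hempty j (by omega) hfj' c hcc
          · intro c hc
            have hcc : c < cols := by
              simp only [List.length_append, List.length_take] at hc
              omega
            rw [take_getD _ _ _ _ hcc]
            exact hcur c hcc

theorem uRow_struct (cols : Nat) (p : List (List String)) (f : Nat → Bool) (n : Nat)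
    (q : List (List String)) (hn : 0 < n) (hq : q.length = n)
    (hqd : ∀ j, j < n → q.getD j [] = dRow cols p j)
    (hlen : ∀ r, r < n → cols ≤ (p.getD r []).length)
    (hfull : ∀ r, r < n → f r = true → ∀ c, c < cols → (p.getD r []).getD c "" ≠ "?")
    (hempty : ∀ r, r < n → f r = false → ∀ c, c < cols → (p.getD r []).getD c "" = "?") :
    ∀ i, i ≤ n - 1 →
      uRowA cols q i = finRow cols p f (((List.range n).filter f).head?) (n-1-i) := by
  have hds := dRow_struct cols p f n hlen hfull hempty
  intro i
  induction i with
  | zero =>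
    intro _
    simp only [Nat.sub_zero]
    rw [show uRowA cols q 0 = q.getD (q.length - 1) [] from rfl, hq, hqd (n-1) (by omega),
      hds (n-1) (by omega)]
    unfold finRow
    by_cases hf : f (n-1)
    · rw [if_pos hf, if_pos hf]
    · rw [if_neg hf, if_neg hf]
      cases hlf : lastF f (n-1) with
      | some st => rfl
      | none =>
        have hfj' : f (n-1) = false := by
          cases hv : f (n-1)
          · rfl
          · exact absurd hv hf
        have hnone : ((List.range n).filter f).head? = none := by
          rw [(filter_range_nil n f).mpr (by
            intro i hi
            by_cases hii : i = n-1
            · subst hii; exact hfj'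
            · exact lastF_none f (n-1) hlf i (by omega))]
          rfl
        rw [hnone]
        rfl
  | succ i ih =>
    intro hi
    have hj1 : (n-1-(i+1)) + 1 = n - 1 - i := by omega
    rw [show uRowA cols q (i+1)
        = copyFill cols (uRowA cols q i) (q.getD (q.length - 1 - (i+1)) []) from rfl, hq,
      ih (by omega), hqd (n-1-(i+1)) (by omega), hds (n-1-(i+1)) (by omega)]
    set j := n-1-(i+1) with hjdef
    by_cases hfj : f j
    · rw [if_pos hfj]
      rw [copyFill_full cols _ _ (fun c hc => hfull j (by omega) hfj c hc)]
      unfold finRow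
      rw [if_pos hfj]
    · have hfj' : f j = false := by
        cases hv : f j
        · rfl
        · exact absurd hv hfj
      rw [if_neg hfj]
      cases hlf : lastF f j with
      | some st =>
        have hst := lastF_some f j st hlf
        have hfullrow : ∀ c, c < cols →
            (((p.getD st []).take cols ++ (p.getD j []).drop cols).getD c "" : String) ≠ "?" := by
          intro c hc
          have hgd : (((p.getD st []).take cols ++ (p.getD j []).drop cols).getD c "" : String)
              = (p.getD st []).getD c "" := by
            rw [List.getD, List.getElem?_append_left (by
              simp only [List.length_append, List.length_take]
              have := hlen st (by omega)
              omega), ← List.getD, take_getD _ _ _ _ hc]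
          rw [hgd]
          exact hfull st (by omega) hst.1 c hc
        rw [copyFill_full cols _ _ hfullrow]
        unfold finRow
        rw [if_neg hfj, hlf]
        rfl
      | none =>
        have hlf1 : lastF f (j+1) = none := by
          rw [lastF_neg f j hfj']
          exact hlf
        have hlen_u : cols ≤ (finRow cols p f (((List.range n).filter f).head?) (n-1-i)).length := by
          unfold finRow
          by_cases hf2 : f (n-1-i)
          · rw [if_pos hf2]
            exact hlen (n-1-i) (by omega)
          · rw [if_neg hf2]
            cases hl2 : (lastF f (n-1-i)).or (((List.range n).filter f).head?) with
            | some st =>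
              have hstn : st < n := by
                cases ho : lastF f (n-1-i) with
                | some s2 =>
                  rw [ho] at hl2
                  injection hl2 with hl2
                  have h3 := lastF_some f (n-1-i) s2 ho
                  omega
                | none =>
                  rw [ho] at hl2
                  rw [show ((none : Option Nat).or (((List.range n).filter f).head?))
                      = ((List.range n).filter f).head? from rfl] at hl2
                  have := head_filter_range n f st hl2
                  omega
              simp only [List.length_append, List.length_take, List.length_drop]
              have h1 := hlen st hstn
              have h2 := hlen (n-1-i) (by omega)
              omega
            | none => exact hlen (n-1-i) (by omega)
        rw [copyFill_empty cols _ _ (hlen j (by omega)) hlen_u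
          (hempty j (by omega) hfj')]
        cases hh : ((List.range n).filter f).head? with
        | some m =>
          obtain ⟨hmn, hfm⟩ := head_filter_range n f m hh
          have hRHS : finRow cols p f (some m) j
              = (p.getD m []).take cols ++ (p.getD j []).drop cols := by
            unfold finRow
            rw [if_neg hfj, hlf]
            rfl
          have hup : (finRow cols p f (some m) (n-1-i)).take cols = (p.getD m []).take cols := by
            rw [← hj1]
            unfold finRow
            by_cases hf2 : f (j+1)
            · have hmj : some (j+1) = some m := by
                rw [← hh]
                exact (filter_range_head n (j+1) f (by omega) hf2 (by
                  intro i2 hi2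
                  by_cases hii : i2 = j
                  · subst hii; exact hfj'
                  · exact lastF_none f j hlf i2 (by omega))).symm
              injection hmj with hmj
              rw [if_pos hf2, hmj]
            · rw [if_neg hf2, hlf1]
              rw [show ((none : Option Nat).or (some m)) = some m from rfl]
              exact take_append_exact _ _ cols (by
                simp only [List.length_take]
                have := hlen m hmn
                omega)
          rw [hup, hRHS]
        | none =>
          have hall : ∀ i2, i2 < n → f i2 = false := by
            have hfe : (List.range n).filter f = [] := by
              cases hfl : (List.range n).filter f with
              | nil => rfl
              | cons a t => rw [hfl] at hh; simp at hh
            exact (filter_range_nil n f).mp hfe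
          have hRHS : finRow cols p f none j = p.getD j [] := by
            unfold finRow
            rw [if_neg hfj, hlf]
            rfl
          have hup : finRow cols p f none (n-1-i) = p.getD (j+1) [] := by
            rw [← hj1]
            unfold finRow
            rw [if_neg (by rw [hall (j+1) (by omega)]; simp), hlf1]
            rfl
          rw [hup, hRHS]
          conv_rhs => rw [← List.take_append_drop cols (p.getD j [])]
          congr 1
          apply eq_of_all_q
          · simp only [List.length_append, List.length_take]
            have h1 := hlen j (by omega)
            have h2 := hlen (j+1) (by omega)
            omega
          · intro c hc
            have hcc : c < cols := by
              simp only [List.length_append, List.length_take] at hc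
              omega
            rw [take_getD _ _ _ _ hcc]
            exact hempty (j+1) (by omega) (hall (j+1) (by omega)) c hcc
          · intro c hc
            have hcc : c < cols := by
              simp only [List.length_append, List.length_take] at hc
              omega
            rw [take_getD _ _ _ _ hcc]
            exact hempty j (by omega) hfj' c hcc


-- ===== assembling the two ports =====
def ph1 (cols : Nat) (b0 : List (List String)) : List (List String) :=
  (List.range b0.length).foldl (fun b r =>
      let b := (List.range' 1 (cols-1)).foldl (fun b c =>
          if pget b r (c-1) ≠ "?" ∧ pget b r c = "?" then pset b r c (pget b r (c-1)) else b) b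
      ((List.range' 1 (cols-1)).reverse).foldl (fun b c =>
          if pget b r (c-1) = "?" then pset b r (c-1) (pget b r c) else b) b) b0

def ph2 (cols rows : Nat) (b1 : List (List String)) : List (List String) :=
  (List.range' 1 (rows-1)).foldl (fun b r =>
      (List.range cols).foldl (fun b c =>
          if pget b r c = "?" then pset b r c (pget b (r-1) c) else b) b) b1

def ph3 (cols rows : Nat) (b2 : List (List String)) : List (List String) :=
  ((List.range' 1 (rows-1)).reverse).foldl (fun b r =>
      (List.range cols).foldl (fun b c =>
          if pget b (r-1) c = "?" then pset b (r-1) c (pget b r c) else b) b) b2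

theorem solve_unfold (block : List (List String)) :
    solve block = "\n" ++ PySem.Str.join "\n"
      ((ph3 ((block.getD 0 []).length) block.length
        (ph2 ((block.getD 0 []).length) block.length
          (ph1 ((block.getD 0 []).length) block))).map (fun row => PySem.Str.join "" row)) := rfl

def bFinal (block : List (List String)) : List (List String) :=
  match (List.range block.length).filter
      (fun r => ((block.getD r []).take ((block.getD 0 []).length)).any (fun x => x ≠ "?")) with
  | [] => block.map (procRow ((block.getD 0 []).length))
  | f0 :: _ =>
    (((List.range block.length).foldl (fun (st : Option Nat × List (List String)) r =>
        if ((List.range block.length).filter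
            (fun r => ((block.getD r []).take ((block.getD 0 []).length)).any (fun x => x ≠ "?"))).contains r
        then (some r, ((block.map (procRow ((block.getD 0 []).length))).getD r []) :: st.2)
        else ((st.1), (((block.map (procRow ((block.getD 0 []).length))).getD (st.1.getD f0) []).take ((block.getD 0 []).length)
          ++ (((block.map (procRow ((block.getD 0 []).length))).getD r []).drop ((block.getD 0 []).length))) :: st.2))
      (none, [])).2).reverse

theorem solve_alt_unfold (block : List (List String)) :
    solve_alt block = "\n" ++ PySem.Str.join "\n"
      ((bFinal block).map (fun row => PySem.Str.join "" row)) := rfl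

theorem procRow_full (cols : Nat) (row : List String) (hc : cols ≤ row.length)
    (ha : (row.take cols).any (fun x => x ≠ "?") = true) :
    ∀ c, c < cols → (procRow cols row).getD c "" ≠ "?" := by
  intro c hcc
  simp only [procRow]
  rw [if_pos ha]
  have hfr : ((fillRow (row.take cols) ++ row.drop cols).getD c "" : String)
      = (fillRow (row.take cols)).getD c "" := by
    simp only [List.getD]
    rw [List.getElem?_append_left (by
      rw [length_fillRow]; simp only [List.length_take]; omega)]
  rw [hfr, fillRow_getD _ c (by simp only [List.length_take]; omega)]
  split
  · exact fbV_ne _ ha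
  · rename_i hne
    exact hne

theorem allq_of_any_false (cols : Nat) (row : List String) (hc : cols ≤ row.length)
    (ha : (row.take cols).any (fun x => x ≠ "?") = false) :
    ∀ c, c < cols → row.getD c "" = "?" := by
  intro c hcc
  have hmem : row.getD c "" ∈ row.take cols := by
    have h1 : (row.take cols)[c]? = some (row.getD c "") := by
      rw [List.getElem?_take, if_pos hcc, getD_getElem? row c "" (by omega)]
    exact List.mem_of_getElem? h1
  have := List.any_eq_false.mp ha _ hmem
  simpa using this

theorem procRow_id (cols : Nat) (row : List String)
    (ha : (row.take cols).any (fun x => x ≠ "?") = false) : procRow cols row = row := by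
  simp only [procRow]
  rw [if_neg (by rw [ha]; simp)]

theorem contains_filter_range (n : Nat) (f : Nat → Bool) (k : Nat) (hk : k < n) :
    ((List.range n).filter f).contains k = f k := by
  cases hfk : f k with
  | false =>
    have hnm : ¬ k ∈ (List.range n).filter f := by
      intro hmem
      have h2 := (List.mem_filter.mp hmem).2
      rw [hfk] at h2
      exact absurd h2 (by simp)
    exact Bool.eq_false_iff.mpr (fun hc => hnm (by simpa using hc))
  | true =>
    have hmem : k ∈ (List.range n).filter f :=
      List.mem_filter.mpr ⟨List.mem_range.mpr hk, hfk⟩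
    simpa using hmem

theorem getD_map_range (g : Nat → List String) (n j : Nat) (hj : j < n) :
    (((List.range n).map g).getD j []) = g j := by
  rw [List.getD, List.getElem?_map]
  rw [show (List.range n)[j]? = some j from by
    rw [List.getElem?_eq_getElem (by simpa using hj)]
    simp]
  rfl

theorem bfold (n cols : Nat) (p : List (List String)) (f : Nat → Bool)
    (filled : List Nat) (f0 : Nat)
    (hcont : ∀ r, r < n → filled.contains r = f r) :
    ∀ k, k ≤ n →
      (List.range k).foldl (fun (st : Option Nat × List (List String)) r =>
          if filled.contains r then (some r, (p.getD r []) :: st.2)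
          else ((st.1), ((p.getD (st.1.getD f0) []).take cols ++ ((p.getD r []).drop cols)) :: st.2))
        (none, [])
      = (lastF f k, ((List.range k).map (finRow cols p f (some f0))).reverse) := by
  intro k
  induction k with
  | zero => intro _; rfl
  | succ k ih =>
    intro hk
    rw [List.range_succ, List.foldl_append, ih (by omega), List.map_append, List.reverse_append]
    simp only [List.foldl_cons, List.foldl_nil, List.map_cons, List.map_nil,
      List.reverse_cons, List.reverse_nil, List.nil_append, List.cons_append]
    by_cases hfk : f k = true
    · rw [if_pos (by rw [hcont k (by omega), hfk])]
      rw [show lastF f (k+1) = some k from lastF_pos f k hfk]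
      rw [show finRow cols p f (some f0) k = p.getD k [] from by
        unfold finRow
        rw [if_pos hfk]]
    · have hfk' : f k = false := by
        cases hv : f k
        · rfl
        · exact absurd hv hfk
      rw [if_neg (by rw [hcont k (by omega), hfk']; simp)]
      rw [show lastF f (k+1) = lastF f k from lastF_neg f k hfk']
      rw [show finRow cols p f (some f0) k
          = (p.getD ((lastF f k).getD f0) []).take cols ++ (p.getD k []).drop cols from by
        unfold finRow
        rw [if_neg hfk]
        cases hlf : lastF f k with
        | some s => rfl
        | none => rfl]

theorem final_eq_gen (cols : Nat) (block : List (List String)) (hn0 : 0 < block.length)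
    (hrows' : ∀ r, r < block.length → cols ≤ (block.getD r []).length) :
    ph3 cols block.length (ph2 cols block.length (ph1 cols block))
    = (match (List.range block.length).filter
          (fun r => ((block.getD r []).take cols).any (fun x => x ≠ "?")) with
      | [] => block.map (procRow cols)
      | f0 :: _ =>
        (((List.range block.length).foldl (fun (st : Option Nat × List (List String)) r =>
            if ((List.range block.length).filter
                (fun r => ((block.getD r []).take cols).any (fun x => x ≠ "?"))).contains r
            then (some r, ((block.map (procRow cols)).getD r []) :: st.2)
            else ((st.1), (((block.map (procRow cols)).getD (st.1.getD f0) []).take cols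
              ++ (((block.map (procRow cols)).getD r []).drop cols)) :: st.2))
          (none, [])).2).reverse) := by
  set n := block.length with hndef
  set f : Nat → Bool := fun r => ((block.getD r []).take cols).any (fun x => x ≠ "?") with hfdef
  set p := block.map (procRow cols) with hpdef
  -- phase 1 equals B's per-row pass
  have hstep1 : ∀ (b : List (List String)) (r : Nat), r < b.length →
      (fun b r =>
        let b := (List.range' 1 (cols-1)).foldl (fun b c =>
            if pget b r (c-1) ≠ "?" ∧ pget b r c = "?" then pset b r c (pget b r (c-1)) else b) b
        ((List.range' 1 (cols-1)).reverse).foldl (fun b c =>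
            if pget b r (c-1) = "?" then pset b r (c-1) (pget b r c) else b) b) b r
      = b.set r (rowA cols (b.getD r [])) := by
    intro b r hr
    show ((List.range' 1 (cols-1)).reverse).foldl (fun b c =>
            if pget b r (c-1) = "?" then pset b r (c-1) (pget b r c) else b)
        ((List.range' 1 (cols-1)).foldl (fun b c =>
            if pget b r (c-1) ≠ "?" ∧ pget b r c = "?" then pset b r c (pget b r (c-1)) else b) b)
      = b.set r (rowA cols (b.getD r []))
    have e1 := foldl_local r fwdStepR
      (fun b c => if pget b r (c-1) ≠ "?" ∧ pget b r c = "?" then pset b r c (pget b r (c-1)) else b)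
      (fun b c => by
        simp only [fwdStepR, pget, pset]
        by_cases h : (b.getD r []).getD (c-1) "" ≠ "?" ∧ (b.getD r []).getD c "" = "?"
        · rw [if_pos h, if_pos h]
        · rw [if_neg h, if_neg h]
          exact (set_getD_self b r []).symm)
      (fun c => by
        simp only [fwdStepR]
        rw [if_neg (by simp)])
      (List.range' 1 (cols-1)) b
    have e2 := foldl_local r bwdStepR
      (fun b c => if pget b r (c-1) = "?" then pset b r (c-1) (pget b r c) else b)
      (fun b c => by
        simp only [bwdStepR, pget, pset]
        by_cases h : (b.getD r []).getD (c-1) "" = "?"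
        · rw [if_pos h, if_pos h]
        · rw [if_neg h, if_neg h]
          exact (set_getD_self b r []).symm)
      (fun c => by
        simp only [bwdStepR]
        rw [if_neg (by simp)])
      ((List.range' 1 (cols-1)).reverse)
      (b.set r ((List.range' 1 (cols-1)).foldl fwdStepR (b.getD r [])))
    rw [e1, e2, List.set_set, getD_set_eq _ _ _ _ hr]
    rfl
  have hA1 : ph1 cols block = p := by
    unfold ph1
    rw [foldl_rows_map (rowA cols) _ hstep1 block, hpdef]
    apply List.map_congr_left
    intro row hrow
    apply rowA_eq_procRow
    obtain ⟨i, hi, heq⟩ := List.getElem_of_mem hrow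
    have h1 : block.getD i [] = row := by
      rw [List.getD, List.getElem?_eq_getElem hi, heq]
      rfl
    have h2 := hrows' i (by rw [hndef] at *; omega)
    rw [h1] at h2
    exact h2
  have hplen : p.length = n := by
    rw [hpdef, hndef]
    simp
  have hpget : ∀ r, r < n → p.getD r [] = procRow cols (block.getD r []) := by
    intro r hr
    rw [hpdef, List.getD, List.getElem?_map, getD_getElem? block r [] (by omega)]
    rfl
  have hplen2 : ∀ r, r < n → cols ≤ (p.getD r []).length := by
    intro r hr
    rw [hpget r hr, length_procRow cols _ (hrows' r hr)]
    exact hrows' r hr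
  have hpfull : ∀ r, r < n → f r = true → ∀ c, c < cols → (p.getD r []).getD c "" ≠ "?" := by
    intro r hr hfr c hc
    have hfr' : ((block.getD r []).take cols).any (fun x => x ≠ "?") = true := hfr
    rw [hpget r hr]
    exact procRow_full cols _ (hrows' r hr) hfr' c hc
  have hpempty : ∀ r, r < n → f r = false → ∀ c, c < cols → (p.getD r []).getD c "" = "?" := by
    intro r hr hfr c hc
    have hfr' : ((block.getD r []).take cols).any (fun x => x ≠ "?") = false := hfr
    rw [hpget r hr, procRow_id cols _ hfr']
    exact allq_of_any_false cols _ (hrows' r hr) hfr' c hc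
  rw [hA1]
  have hstep2 : ∀ (b : List (List String)) (r : Nat), 1 ≤ r → r < b.length →
      (fun b r => (List.range cols).foldl (fun b c =>
          if pget b r c = "?" then pset b r c (pget b (r-1) c) else b) b) b r
      = b.set r (copyFill cols (b.getD (r-1) []) (b.getD r [])) := by
    intro b r h1r hr
    show (List.range cols).foldl (fun b c =>
        if pget b r c = "?" then pset b r c (pget b (r-1) c) else b) b
      = b.set r (copyFill cols (b.getD (r-1) []) (b.getD r []))
    exact foldl_local2 r (r-1) (by omega) cpStepR _
      (fun b c => by
        simp only [cpStepR, pget, pset]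
        by_cases h : (b.getD r []).getD c "" = "?"
        · rw [if_pos h, if_pos h]
        · rw [if_neg h, if_neg h]
          exact (set_getD_self b r []).symm)
      (fun prev c => by
        simp only [cpStepR]
        rw [if_neg (by simp)])
      (List.range cols) b
  have h2all := phase2_getD cols (fun b r => (List.range cols).foldl (fun b c =>
      if pget b r c = "?" then pset b r c (pget b (r-1) c) else b) b) hstep2 (n-1) p
      (by rw [hplen]; omega)
  have hqlen : (ph2 cols n p).length = n := by
    unfold ph2
    rw [h2all.1, hplen]
  have hqd : ∀ j, j < n → (ph2 cols n p).getD j [] = dRow cols p j := by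
    intro j hj
    unfold ph2
    rw [h2all.2 j (by omega), if_pos (by omega)]
  have hstep3 : ∀ (b : List (List String)) (r : Nat), 1 ≤ r → r < b.length →
      (fun b r => (List.range cols).foldl (fun b c =>
          if pget b (r-1) c = "?" then pset b (r-1) c (pget b r c) else b) b) b r
      = b.set (r-1) (copyFill cols (b.getD r []) (b.getD (r-1) [])) := by
    intro b r h1r hr
    show (List.range cols).foldl (fun b c =>
        if pget b (r-1) c = "?" then pset b (r-1) c (pget b r c) else b) b
      = b.set (r-1) (copyFill cols (b.getD r []) (b.getD (r-1) []))
    exact foldl_local2 (r-1) r (by omega) cpStepR _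
      (fun b c => by
        simp only [cpStepR, pget, pset]
        by_cases h : (b.getD (r-1) []).getD c "" = "?"
        · rw [if_pos h, if_pos h]
        · rw [if_neg h, if_neg h]
          exact (set_getD_self b (r-1) []).symm)
      (fun prev c => by
        simp only [cpStepR]
        rw [if_neg (by simp)])
      (List.range cols) b
  have h3all := phase3_getD cols (fun b r => (List.range cols).foldl (fun b c =>
      if pget b (r-1) c = "?" then pset b (r-1) c (pget b r c) else b) b) hstep3
      (ph2 cols n p) (n-1) (ph2 cols n p) rfl (by rw [hqlen]; omega)
      (by
        intro j hj
        rw [hqlen] at hj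
        by_cases hje : n-1 ≤ j
        · rw [if_pos hje]
          have e : (ph2 cols n p).length - 1 - j = 0 := by rw [hqlen]; omega
          rw [e]
          show (ph2 cols n p).getD j [] = (ph2 cols n p).getD ((ph2 cols n p).length - 1) []
          congr 1
          rw [hqlen]
          omega
        · rw [if_neg hje])
  have hAfin : ∀ j, j < n → (ph3 cols n (ph2 cols n p)).getD j []
      = finRow cols p f (((List.range n).filter f).head?) j := by
    intro j hj
    unfold ph3
    rw [h3all.2 j (by rw [hqlen]; omega)]
    rw [uRow_struct cols p f n (ph2 cols n p) (by omega) hqlen hqd hplen2 hpfull hpempty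
      ((ph2 cols n p).length - 1 - j) (by rw [hqlen]; omega)]
    congr 1
    rw [hqlen]
    omega
  have hAlen : (ph3 cols n (ph2 cols n p)).length = n := by
    unfold ph3
    rw [h3all.1, hqlen]
  have hAmap : ph3 cols n (ph2 cols n p)
      = (List.range n).map (finRow cols p f (((List.range n).filter f).head?)) := by
    apply ext_getD _ _ [] (by rw [hAlen]; simp)
    intro j hj
    rw [hAlen] at hj
    rw [hAfin j hj, getD_map_range _ _ j hj]
  rw [hAmap]
  cases hfe : (List.range n).filter f with
  | nil =>
    show (List.range n).map (finRow cols p f (([] : List Nat).head?)) = p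
    have hallf := (filter_range_nil n f).mp hfe
    apply ext_getD _ _ [] (by rw [hplen]; simp)
    intro j hj
    have hjn : j < n := by simpa using hj
    rw [getD_map_range _ _ j hjn]
    unfold finRow
    rw [if_neg (by rw [hallf j hjn]; simp),
      lastF_none_of f j (fun i hi => hallf i (by omega))]
    rfl
  | cons f0 t =>
    show (List.range n).map (finRow cols p f ((f0 :: t).head?))
      = (((List.range n).foldl (fun (st : Option Nat × List (List String)) r =>
          if (f0 :: t).contains r then (some r, (p.getD r []) :: st.2)
          else ((st.1), ((p.getD (st.1.getD f0) []).take cols ++ ((p.getD r []).drop cols)) :: st.2))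
        (none, [])).2).reverse
    rw [bfold n cols p f (f0 :: t) f0 (fun r hr => by
      rw [← hfe, contains_filter_range n f r hr]) n (le_refl n)]
    rw [List.reverse_reverse]
    rfl

-- ===== MAIN =====
theorem final_eq (block : List (List String)) (hne : block ≠ [])
    (hrows : ∀ row ∈ block, (block.headD []).length ≤ row.length) :
    ph3 ((block.getD 0 []).length) block.length
      (ph2 ((block.getD 0 []).length) block.length
        (ph1 ((block.getD 0 []).length) block)) = bFinal block := by
  have hhd : block.headD [] = block.getD 0 [] := by
    cases block
    · rfl
    · rfl
  have hn0 : 0 < block.length := by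
    cases block
    · exact absurd rfl hne
    · simp
  have hrows' : ∀ r, r < block.length → (block.getD 0 []).length ≤ (block.getD r []).length := by
    intro r hr
    have h1 : block[r]? = some (block.getD r []) := getD_getElem? block r [] hr
    have hmem : block.getD r [] ∈ block := List.mem_of_getElem? h1
    have h2 := hrows _ hmem
    rw [hhd] at h2
    exact h2
  rw [final_eq_gen ((block.getD 0 []).length) block hn0 hrows']
  rfl

-- ===== VERDICT (by name: the statement is the Claim_ definition above) =====
theorem solve_spec : Claim_equal_solve := by
  intro block hdom hpre
  show solve block = solve_alt block
  obtain ⟨hne, hrows⟩ := hpre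
  rw [solve_unfold, solve_alt_unfold, final_eq block hne hrows]
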